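-- pv_equiv track=rewrite | github.com/mauriciogtec/rulebots | agents.py | generate_rule_combinations
-- ===== SOURCE A (Python) =====
-- from itertools import combinations
-- from typing import Dict, List, Literal, Optional, Sequence, Tuple
--
-- def generate_rule_combinations(
--     rules: List[Dict], max_combs: Optional[int] = None
-- ) -> List[Dict]:
--     all_combinations = []
--     for r in range(max_combs or len(rules)):
--         for combs in combinations(rules, r + 1):
--             all_combinations.append("\n".join(combs))
--
--     return all_combinations
-- ===== SOURCE B (Python) =====
-- def _splits(xs):
--     # each element paired with the elements strictly after it
--     return [(xs[i], xs[i + 1:]) for i in range(len(xs))]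
--
--
-- def generate_rule_combinations(rules, max_combs=None):
--     limit = max_combs or len(rules)
--     out = []
--     level = _splits(rules)  # size-1 combinations, each with its usable tail
--     k = 0
--     while k < limit and level:
--         out += [s for s, _ in level]
--         level = [(s + "\n" + y, ys) for s, rest in level for y, ys in _splits(rest)]
--         k += 1
--     return out
-- ===== Notes on version B (the rewrite author's own statement) =====
-- stated objective: alternative
-- what changed: Replaces the per-size itertools.combinations calls with a breadth-first level construction: size-1 combinations paired with their usable tails are repeatedly extended by one later element, emitting each level's joined strings, stopping early when no combinations remain.
import Mathlib
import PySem

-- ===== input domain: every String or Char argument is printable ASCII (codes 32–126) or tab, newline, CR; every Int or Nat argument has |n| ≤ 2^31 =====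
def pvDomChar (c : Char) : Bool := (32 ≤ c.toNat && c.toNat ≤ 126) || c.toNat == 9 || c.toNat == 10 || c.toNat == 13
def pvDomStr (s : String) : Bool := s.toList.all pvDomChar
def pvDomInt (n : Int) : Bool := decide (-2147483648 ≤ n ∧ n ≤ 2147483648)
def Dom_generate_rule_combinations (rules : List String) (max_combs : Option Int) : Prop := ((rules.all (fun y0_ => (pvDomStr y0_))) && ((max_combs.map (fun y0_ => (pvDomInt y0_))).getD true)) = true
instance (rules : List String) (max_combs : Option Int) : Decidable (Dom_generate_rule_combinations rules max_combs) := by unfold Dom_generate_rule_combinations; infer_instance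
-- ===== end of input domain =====

-- B replaces per-size itertools.combinations with an incremental level-by-level extension
-- of combinations by one later element (objective: alternative algorithm, same output).

-- ===== PORT A =====
-- itertools.combinations(l, k) in its lexicographic emission order
def pyCombs : Nat → List String → List (List String)
  | 0, _ => [[]]
  | _ + 1, [] => []
  | k + 1, x :: xs => (pyCombs k xs).map (fun c => x :: c) ++ pyCombs (k + 1) xs

def generate_rule_combinations (rules : List String) (max_combs : Option Int) : List String :=
  -- 'max_combs or len(rules)': None and 0 are falsy
  let hi : Int := match max_combs with
    | none => (rules.length : Int)
    | some v => if v = 0 then (rules.length : Int) else v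
  (PySem.List.pyRange 0 hi 1).foldl
    (fun acc r =>
      (pyCombs (r + 1).toNat rules).foldl
        (fun acc2 combs => acc2 ++ [PySem.Str.join "\n" combs]) acc)
    []

-- ===== PORT B =====
-- each element paired with the elements strictly after it  ('_splits' in Source B)
def bSplits : List String → List (String × List String)
  | [] => []
  | x :: xs => (x, xs) :: bSplits xs

-- one level of extension: append every later element to each combination
def bExtend (level : List (String × List String)) : List (String × List String) :=
  level.flatMap (fun p => (bSplits p.2).map (fun q => (p.1 ++ "\n" ++ q.1, q.2)))

-- the 'while k < limit and level' loop
def bLoop : Nat → List (String × List String) → List String → List String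
  | 0, _, acc => acc
  | _ + 1, [], acc => acc
  | k + 1, level, acc => bLoop k (bExtend level) (acc ++ level.map (fun p => p.1))

def generate_rule_combinations_alt (rules : List String) (max_combs : Option Int) : List String :=
  let limit : Int := match max_combs with
    | none => (rules.length : Int)
    | some v => if v = 0 then (rules.length : Int) else v
  bLoop limit.toNat (bSplits rules) []

-- ===== PRECONDITION & SPEC =====
def Spec_generate_rule_combinations (rules : List String) (max_combs : Option Int) (out : List String) : Prop := out = generate_rule_combinations_alt rules max_combs
instance (rules : List String) (max_combs : Option Int) (out : List String) : Decidable (Spec_generate_rule_combinations rules max_combs out) := by unfold Spec_generate_rule_combinations; infer_instance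

-- ===== CLAIM (what is proved, stated in full; the proofs are below) =====
def Claim_equal_generate_rule_combinations : Prop := ∀ (rules : List String) (max_combs : Option Int), Dom_generate_rule_combinations rules max_combs → Spec_generate_rule_combinations rules max_combs (generate_rule_combinations rules max_combs)

-- ===== LEMMAS AND PROOFS =====

theorem join_singleton' (x : String) : PySem.Str.join "\n" [x] = x := by
  simp [PySem.Str.join]

theorem join_cons_cons' (x y : String) (c : List String) :
    PySem.Str.join "\n" (x :: y :: c) = x ++ "\n" ++ PySem.Str.join "\n" (y :: c) := by
  apply String.toList_injective ?_
  simp [PySem.Chars.join_cons_cons]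

theorem join_head (s x : String) (c : List String) :
    PySem.Str.join "\n" ((s ++ "\n" ++ x) :: c) = s ++ "\n" ++ PySem.Str.join "\n" (x :: c) := by
  cases c with
  | nil => rw [join_singleton', join_singleton']
  | cons b c' => rw [join_cons_cons', join_cons_cons']; simp [String.append_assoc]

-- the joined strings contributed by a level, after k further extensions
def levelOut (k : Nat) (L : List (String × List String)) : List String :=
  L.flatMap (fun p => (pyCombs k p.2).map (fun c => PySem.Str.join "\n" (p.1 :: c)))

theorem levelOut_zero (L : List (String × List String)) :
    levelOut 0 L = L.map (fun p => p.1) := by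
  induction L with
  | nil => rfl
  | cons p L' ih => simp [levelOut, pyCombs, join_singleton'] at ih ⊢; exact ih

theorem levelOut_extend_single (k : Nat) (s : String) (rest : List String) :
    (bSplits rest).flatMap
        (fun q => (pyCombs k q.2).map (fun c => PySem.Str.join "\n" ((s ++ "\n" ++ q.1) :: c)))
      = (pyCombs (k + 1) rest).map (fun c => PySem.Str.join "\n" (s :: c)) := by
  induction rest with
  | nil => simp [bSplits, pyCombs]
  | cons x xs ih =>
      simp only [bSplits, pyCombs, List.flatMap_cons, List.map_append, List.map_map, ih]
      congr 1
      apply List.map_congr_left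
      intro c _
      simp [Function.comp, join_head, join_cons_cons']

theorem levelOut_extend (k : Nat) (L : List (String × List String)) :
    levelOut k (bExtend L) = levelOut (k + 1) L := by
  unfold levelOut bExtend
  rw [List.flatMap_assoc]
  apply List.flatMap_congr  -- pointwise
  intro p _
  rw [List.flatMap_map]
  exact levelOut_extend_single k p.1 p.2

theorem levelOut_nil (k : Nat) : levelOut k ([] : List (String × List String)) = [] := by
  simp [levelOut]

theorem bLoop_acc (n : Nat) (L : List (String × List String)) (acc : List String) :
    bLoop n L acc = acc ++ bLoop n L [] := by
  induction n generalizing L acc with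
  | zero => simp [bLoop]
  | succ n ih =>
      cases L with
      | nil => simp [bLoop]
      | cons p L' =>
          have e1 : bLoop (n + 1) (p :: L') acc
              = bLoop n (bExtend (p :: L')) (acc ++ (p :: L').map (fun p => p.1)) := rfl
          have e2 : bLoop (n + 1) (p :: L') []
              = bLoop n (bExtend (p :: L')) ([] ++ (p :: L').map (fun p => p.1)) := rfl
          rw [e1, e2, ih (bExtend (p :: L')) (acc ++ _), ih (bExtend (p :: L')) ([] ++ _)]
          simp

theorem bLoop_eq_flatMap (n : Nat) (L : List (String × List String)) :
    bLoop n L [] = (List.range n).flatMap (fun k => levelOut k L) := by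
  induction n generalizing L with
  | zero => simp [bLoop]
  | succ n ih =>
      cases L with
      | nil =>
          simp [bLoop, levelOut_nil]
      | cons p L' =>
          have e1 : bLoop (n + 1) (p :: L') []
              = bLoop n (bExtend (p :: L')) ([] ++ (p :: L').map (fun p => p.1)) := rfl
          rw [e1, bLoop_acc, ih, List.range_succ_eq_map]
          simp only [List.flatMap_cons, List.flatMap_map, List.nil_append]
          rw [levelOut_zero]
          congr 1
          apply List.flatMap_congr
          intro k _
          exact levelOut_extend k (p :: L')

theorem levelOut_splits (k : Nat) (xs : List String) :
    levelOut k (bSplits xs) = (pyCombs (k + 1) xs).map (PySem.Str.join "\n") := by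
  induction xs with
  | nil => simp [bSplits, levelOut, pyCombs]
  | cons x xs ih =>
      simp only [bSplits, pyCombs, levelOut, List.flatMap_cons, List.map_append, List.map_map]
      simp only [levelOut] at ih
      rw [ih]; simp [Function.comp]

theorem foldl_inner (l : List (List String)) (acc : List String) :
    l.foldl (fun acc2 combs => acc2 ++ [PySem.Str.join "\n" combs]) acc
      = acc ++ l.map (PySem.Str.join "\n") := by
  induction l generalizing acc with
  | nil => simp
  | cons c l' ih => rw [List.foldl_cons, ih]; simp

theorem A_eq_flatMap (rules : List String) (hi : Int) :
    (PySem.List.pyRange 0 hi 1).foldl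
        (fun acc r =>
          (pyCombs (r + 1).toNat rules).foldl
            (fun acc2 combs => acc2 ++ [PySem.Str.join "\n" combs]) acc) []
      = (List.range hi.toNat).flatMap
          (fun k => (pyCombs (k + 1) rules).map (PySem.Str.join "\n")) := by
  have h1 : ∀ (l : List Int) (acc : List String),
      l.foldl
        (fun acc r =>
          (pyCombs (r + 1).toNat rules).foldl
            (fun acc2 combs => acc2 ++ [PySem.Str.join "\n" combs]) acc) acc
      = l.foldl
        (fun acc r => acc ++ (pyCombs (r + 1).toNat rules).map (PySem.Str.join "\n")) acc := by
    intro l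
    induction l with
    | nil => intro acc; rfl
    | cons r l' ih =>
        intro acc
        rw [List.foldl_cons, List.foldl_cons, foldl_inner, ih]
  rw [h1, PySem.List.foldl_append_eq_flatMap, List.nil_append,
      PySem.List.pyRange_one, List.flatMap_map]
  simp only [Int.sub_zero]
  apply List.flatMap_congr
  intro k _
  congr 2
  omega

-- ===== VERDICT (by name: the statement is the Claim_ definition above) =====
theorem generate_rule_combinations_spec : Claim_equal_generate_rule_combinations := by
  intro rules max_combs _
  unfold Spec_generate_rule_combinations generate_rule_combinations generate_rule_combinations_alt
  rw [A_eq_flatMap, bLoop_eq_flatMap]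
  apply List.flatMap_congr
  intro k _
  exact (levelOut_splits k rules).symm
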